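-- pv_equiv track=rewrite | github.com/avkritsky/SIH | view/main_menu/statistics.py | generate_colors_for_stats
-- ===== SOURCE A (Python) =====
-- def generate_colors_for_stats(user_data_plt: dict) -> list:
--     """Generate colors for stats bars"""
--     colors = []
--     summary = 0
--     for i, value in enumerate(user_data_plt.values()):
--         if i % 2 == 0:
--             colors.append('blue')
--             summary = value
--         else:
--             if value - summary >= 0:
--                 colors.append('green')
--             else:
--                 colors.append('red')
--     return colors
-- ===== SOURCE B (Python) =====
-- def generate_colors_for_stats(user_data_plt: dict) -> list:
--     """Generate colors for stats bars"""
--     colors = []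
--     it = iter(user_data_plt.values())
--     for a in it:
--         colors.append('blue')
--         b = next(it, None)
--         if b is None:
--             break
--         colors.append('green' if b - a >= 0 else 'red')
--     return colors
-- ===== Notes on version B (the rewrite author's own statement) =====
-- stated objective: alternative
-- what changed: Replaces the parity-indexed single pass with a carried 'summary' variable by a pairwise traversal that consumes two values per iteration from an iterator, needing no index or carried state.
import Mathlib
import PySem

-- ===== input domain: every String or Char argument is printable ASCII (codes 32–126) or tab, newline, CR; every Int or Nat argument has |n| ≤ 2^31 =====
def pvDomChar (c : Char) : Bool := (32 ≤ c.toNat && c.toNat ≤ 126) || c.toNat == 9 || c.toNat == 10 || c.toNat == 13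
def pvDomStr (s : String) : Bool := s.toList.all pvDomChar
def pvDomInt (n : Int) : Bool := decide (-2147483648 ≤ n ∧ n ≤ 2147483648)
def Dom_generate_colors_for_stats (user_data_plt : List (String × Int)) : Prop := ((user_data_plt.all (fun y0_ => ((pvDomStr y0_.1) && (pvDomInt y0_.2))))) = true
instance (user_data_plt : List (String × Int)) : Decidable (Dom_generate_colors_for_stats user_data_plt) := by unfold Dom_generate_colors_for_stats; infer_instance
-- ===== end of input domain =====

-- ===== PORT A =====
-- B changes only the decomposition (pairwise recursion instead of a parity-indexed
-- pass with a carried summary); same values, same output.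
-- enumerate loop of A: i is the index, summary the last even-position value
def pvLoopA : List Int → Nat → Int → List String
  | [], _, _ => []
  | v :: rest, i, summary =>
    if i % 2 == 0 then
      "blue" :: pvLoopA rest (i + 1) v
    else
      (if v - summary ≥ 0 then "green" else "red") :: pvLoopA rest (i + 1) summary

def generate_colors_for_stats (user_data_plt : List (String × Int)) : List String :=
  pvLoopA (PySem.Dict.ofList user_data_plt).values 0 0

-- ===== PORT B =====
-- go from Source B: pairwise structural recursion, two values per step
def pvGoB : List Int → List String
  | [] => []
  | [_] => ["blue"]
  | a :: b :: rest => "blue" :: (if b - a ≥ 0 then "green" else "red") :: pvGoB rest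

def generate_colors_for_stats_alt (user_data_plt : List (String × Int)) : List String :=
  pvGoB (PySem.Dict.ofList user_data_plt).values

-- ===== PRECONDITION & SPEC =====
def Spec_generate_colors_for_stats (user_data_plt : List (String × Int)) (out : List String) : Prop := out = generate_colors_for_stats_alt user_data_plt
instance (user_data_plt : List (String × Int)) (out : List String) : Decidable (Spec_generate_colors_for_stats user_data_plt out) := by unfold Spec_generate_colors_for_stats; infer_instance

-- ===== CLAIM (what is proved, stated in full; the proofs are below) =====
def Claim_equal_generate_colors_for_stats : Prop := ∀ (user_data_plt : List (String × Int)), Dom_generate_colors_for_stats user_data_plt → Spec_generate_colors_for_stats user_data_plt (generate_colors_for_stats user_data_plt)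

-- ===== LEMMAS AND PROOFS =====
theorem pvLoopA_eq_pvGoB (vals : List Int) :
    ∀ (i : Nat) (s : Int), i % 2 = 0 → pvLoopA vals i s = pvGoB vals := by
  induction vals using pvGoB.induct with
  | case1 => intro i s _; simp [pvLoopA, pvGoB]
  | case2 v => intro i s hi; simp [pvLoopA, pvGoB, hi]
  | case3 a b rest ih =>
    intro i s hi
    have h1 : (i + 1) % 2 = 1 := by omega
    have h2 : (i + 2) % 2 = 0 := by omega
    simp [pvLoopA, pvGoB, hi, h1, ih _ a h2]

-- ===== VERDICT (by name: the statement is the Claim_ definition above) =====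
theorem generate_colors_for_stats_spec : Claim_equal_generate_colors_for_stats := by
  intro d _
  unfold Spec_generate_colors_for_stats generate_colors_for_stats generate_colors_for_stats_alt
  exact pvLoopA_eq_pvGoB _ 0 0 rfl
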